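-- pv_equiv track=rewrite | github.com/sean0921/python-es2021 | hw07.py | yearjday_to_ymd
-- ===== SOURCE A (Python) =====
-- def year_is_yun(year: int) -> bool:
--     if year % 4 != 0:
--         return False
--     if ( year % 100 == 0 ) and ( year % 400 != 0):
--         return False
--     return True
--
-- def month_days_list(year: int) -> list:
--     if year_is_yun(year) == True:
--         month_list = [31,29,31,30,31,30,31,31,30,31,30,31]
--     else:
--         month_list = [31,28,31,30,31,30,31,31,30,31,30,31]
--     return month_list
--
-- def yearjday_to_ymd(year: int, julian_day: int):
--     i=0
--     month=1
--     day=julian_day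
--     while True:
--         julian_day -= month_days_list(year)[i]
--         if julian_day > 0:
--             month+=1
--             i+=1
--             day=julian_day
--             continue
--         else:
--             break
--     return year,month,day
-- ===== SOURCE B (Python) =====
-- def _md_core(leap: bool, julian_day: int):
--     # cumulative month-end day-of-year table for the 12 months
--     lengths = [31, 29 if leap else 28, 31, 30, 31, 30, 31, 31, 30, 31, 30, 31]
--     cum = []
--     total = 0
--     for d in lengths:
--         total += d
--         cum.append(total)
--     month = 1 + sum(1 for c in cum if c < julian_day)
--     prev = cum[month - 2] if month > 1 else 0
--     return month, julian_day - prev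
--
-- def yearjday_to_ymd(year: int, julian_day: int):
--     leap = year % 4 == 0 and (year % 100 != 0 or year % 400 == 0)
--     month, day = _md_core(leap, julian_day)
--     return year, month, day
-- ===== Notes on version B (the rewrite author's own statement) =====
-- stated objective: alternative
-- what changed: A repeatedly subtracts month lengths in a while loop that mutates julian_day, month and an index; B builds a 12-entry cumulative month-end table once, takes month = 1 + count of table entries below julian_day, and day = julian_day minus the previous table entry.
import Mathlib
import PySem

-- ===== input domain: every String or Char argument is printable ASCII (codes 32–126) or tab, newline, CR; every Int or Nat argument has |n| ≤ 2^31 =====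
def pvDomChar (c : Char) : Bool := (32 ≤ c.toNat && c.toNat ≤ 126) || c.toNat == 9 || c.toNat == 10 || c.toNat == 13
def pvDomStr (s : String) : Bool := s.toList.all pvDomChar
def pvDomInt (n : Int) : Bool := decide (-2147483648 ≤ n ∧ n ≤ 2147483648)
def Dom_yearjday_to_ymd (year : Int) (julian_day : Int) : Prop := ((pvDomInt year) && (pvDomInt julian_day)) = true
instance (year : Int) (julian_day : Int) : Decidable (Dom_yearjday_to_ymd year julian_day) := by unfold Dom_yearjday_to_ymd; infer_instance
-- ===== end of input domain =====

-- B replaces A's repeated-subtraction while loop by a 12-entry cumulative month-end table: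
-- month = 1 + #(entries < julian_day), day = julian_day - previous entry (alternative decomposition, same cost).


-- ===== PORT A =====
def year_is_yun (year : Int) : Bool :=
  if year % 4 ≠ 0 then false
  else if (year % 100 = 0) ∧ (year % 400 ≠ 0) then false
  else true

def month_days_list (year : Int) : List Int :=
  if year_is_yun year = true then
    [31,29,31,30,31,30,31,31,30,31,30,31]
  else
    [31,28,31,30,31,30,31,31,30,31,30,31]

-- A's while loop: the index i walks month_days_list(year) from 0; walking the list itself is
-- the same traversal.  `none` = Python's IndexError when i runs past the 12 entries.
-- State (month, jd): Python's `day` always equals the jd value entering the iteration.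
def yearjday_loop : List Int → Int → Int → Option (Int × Int)
  | [], _, _ => none
  | m :: rest, month, jd =>
      let jd' := jd - m
      if jd' > 0 then yearjday_loop rest (month + 1) jd'
      else some (month, jd)

def yearjday_to_ymd (year : Int) (julian_day : Int) : Int × Int × Int :=
  match yearjday_loop (month_days_list year) 1 julian_day with
  | some (m, d) => (year, m, d)
  | none => (year, 0, 0)   -- IndexError in Python; excluded by Pre_

-- ===== PORT B =====
def md_core (leap : Bool) (julian_day : Int) : Int × Int :=
  let lengths : List Int := [31, if leap then 29 else 28, 31, 30, 31, 30, 31, 31, 30, 31, 30, 31]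
  let cum := (lengths.foldl (fun (acc : List Int × Int) d =>
      (acc.1 ++ [acc.2 + d], acc.2 + d)) ([], 0)).1
  let month : Int := 1 + (cum.countP (fun c => c < julian_day) : Int)
  let prev : Int := if month > 1 then cum.getD (month - 2).toNat 0 else 0
  (month, julian_day - prev)

def yearjday_to_ymd_alt (year : Int) (julian_day : Int) : Int × Int × Int :=
  let leap := year % 4 = 0 ∧ (year % 100 ≠ 0 ∨ year % 400 = 0)
  let md := md_core (decide leap) julian_day
  (year, md.1, md.2)

-- ===== PRECONDITION & SPEC =====
-- A raises IndexError when julian_day exceeds the number of days in the year; Pre_ excludes exactly those inputs.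
def Pre_yearjday_to_ymd (year : Int) (julian_day : Int) : Prop :=
  julian_day ≤ (if year % 4 = 0 ∧ (year % 100 ≠ 0 ∨ year % 400 = 0) then 366 else 365)
instance (year : Int) (julian_day : Int) : Decidable (Pre_yearjday_to_ymd year julian_day) := by unfold Pre_yearjday_to_ymd; infer_instance
def pvWitness_yearjday_to_ymd : Int × Int := (2021, 100)

def Spec_yearjday_to_ymd (year : Int) (julian_day : Int) (out : Int × Int × Int) : Prop := out = yearjday_to_ymd_alt year julian_day
instance (year : Int) (julian_day : Int) (out : Int × Int × Int) : Decidable (Spec_yearjday_to_ymd year julian_day out) := by unfold Spec_yearjday_to_ymd; infer_instance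

-- ===== CLAIM (what is proved, stated in full; the proofs are below) =====
def Claim_equal_yearjday_to_ymd : Prop := ∀ (year : Int) (julian_day : Int), Dom_yearjday_to_ymd year julian_day → Pre_yearjday_to_ymd year julian_day → Spec_yearjday_to_ymd year julian_day (yearjday_to_ymd year julian_day)

-- ===== LEMMAS AND PROOFS =====

-- the two programs compute the same leap-year test
theorem leap_agree (year : Int) :
    year_is_yun year = decide (year % 4 = 0 ∧ (year % 100 ≠ 0 ∨ year % 400 = 0)) := by
  unfold year_is_yun
  split_ifs with h1 h2 <;> simp_all <;> omega

theorem mdl_eq (year : Int) :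
    month_days_list year =
      [31, if year_is_yun year then 29 else 28, 31, 30, 31, 30, 31, 31, 30, 31, 30, 31] := by
  unfold month_days_list
  cases h : year_is_yun year <;> simp [h]

-- small-jd case: both sides give (month 1, day jd)
theorem core_small (b : Bool) (jd : Int) (h : jd ≤ 31) :
    yearjday_loop [31, if b then 29 else 28, 31, 30, 31, 30, 31, 31, 30, 31, 30, 31] 1 jd
      = some (md_core b jd) := by
  have hcount : ([(31 : Int), if b then 60 else 59, if b then 91 else 90, if b then 121 else 120,
      if b then 152 else 151, if b then 182 else 181, if b then 213 else 212, if b then 244 else 243,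
      if b then 274 else 273, if b then 305 else 304, if b then 335 else 334,
      if b then 366 else 365].countP (fun c => c < jd)) = 0 := by
    rw [List.countP_eq_zero]
    intro a ha
    cases b <;> simp_all <;> omega
  cases b <;>
    · simp only [yearjday_loop, md_core, List.foldl, if_true, if_false] at *
      rw [if_neg (by omega)]
      simp only [List.append_nil, List.nil_append, List.cons_append, List.singleton_append] at *
      norm_num at hcount ⊢
      omega

-- the finitely many remaining jd values, checked by evaluation
set_option maxRecDepth 4000 in
theorem core_ball_false : ∀ n : Nat, n < 334 →
    yearjday_loop [31, 28, 31, 30, 31, 30, 31, 31, 30, 31, 30, 31] 1 (32 + (n : Int))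
      = some (md_core false (32 + (n : Int))) := by decide

set_option maxRecDepth 4000 in
theorem core_ball_true : ∀ n : Nat, n < 335 →
    yearjday_loop [31, 29, 31, 30, 31, 30, 31, 31, 30, 31, 30, 31] 1 (32 + (n : Int))
      = some (md_core true (32 + (n : Int))) := by decide

theorem core_eq (b : Bool) (jd : Int) (h : jd ≤ if b then 366 else 365) :
    yearjday_loop [31, if b then 29 else 28, 31, 30, 31, 30, 31, 31, 30, 31, 30, 31] 1 jd
      = some (md_core b jd) := by
  by_cases hs : jd ≤ 31
  · exact core_small b jd hs
  · obtain ⟨n, hn⟩ : ∃ n : Nat, jd = 32 + (n : Int) :=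
      ⟨(jd - 32).toNat, by omega⟩
    subst hn
    cases b
    · simpa using core_ball_false n (by simp at h; omega)
    · simpa using core_ball_true n (by simp at h; omega)

-- ===== VERDICT (by name: the statement is the Claim_ definition above) =====
theorem yearjday_to_ymd_spec : Claim_equal_yearjday_to_ymd := by
  intro year jd _ hpre
  unfold Spec_yearjday_to_ymd yearjday_to_ymd yearjday_to_ymd_alt
  rw [mdl_eq, leap_agree]
  set b := decide (year % 4 = 0 ∧ (year % 100 ≠ 0 ∨ year % 400 = 0)) with hb
  have hle : jd ≤ if b then 366 else 365 := by
    unfold Pre_yearjday_to_ymd at hpre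
    by_cases hc : year % 4 = 0 ∧ (year % 100 ≠ 0 ∨ year % 400 = 0) <;>
      simp [hb, hc] at hpre ⊢ <;> omega
  rw [core_eq b jd hle]
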